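-- pv_equiv track=rewrite | github.com/IanHuangOwO/chulab_model-trainer | test.py | compute_z_plan
-- ===== SOURCE A (Python) =====
-- from typing import List, Tuple
--
-- def compute_z_plan(volume_depth: int, patch_depth: int, z_overlap: int) -> List[Tuple[int, int]]:
--     assert patch_depth > 0 and z_overlap >= 0
--     assert patch_depth > z_overlap
--
--     step = patch_depth - z_overlap
--     patches: List[Tuple[int, int]] = []
--     z = 0
--     while z + patch_depth <= volume_depth:
--         if z + patch_depth == volume_depth:
--             patches.append((z, -1))
--         else:
--             patches.append((z, z_overlap))
--         z += step
--
--     if not patches or patches[-1][1] != -1: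
--         last_start = volume_depth - patch_depth
--         if patches:
--             patches[-1] = (patches[-1][0], patches[-1][0] + patch_depth - last_start)
--         patches.append((last_start, -1))
--     return patches
-- ===== SOURCE B (Python) =====
-- from typing import List, Tuple
--
-- def compute_z_plan(volume_depth: int, patch_depth: int, z_overlap: int) -> List[Tuple[int, int]]:
--     assert patch_depth > 0 and z_overlap >= 0
--     assert patch_depth > z_overlap
--
--     step = patch_depth - z_overlap
--     last_start = volume_depth - patch_depth
--     starts = list(range(0, last_start + 1, step))
--     if not starts or starts[-1] != last_start:
--         starts.append(last_start)
--     body = [(s, patch_depth - (t - s)) for s, t in zip(starts, starts[1:])]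
--     return body + [(last_start, -1)]
-- ===== Notes on version B (the rewrite author's own statement) =====
-- stated objective: simpler
-- what changed: Replaced the emit-then-fixup while loop (which patches the previously appended tuple after the fact) by a starts-first decomposition: build all start positions with range plus one conditional append, then derive each overlap as patch_depth minus the difference of consecutive starts. Pre_ excludes only inputs where A's asserts raise (patch_depth <= 0, z_overlap < 0, or z_overlap >= patch_depth); B asserts identically there.
import Mathlib
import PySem

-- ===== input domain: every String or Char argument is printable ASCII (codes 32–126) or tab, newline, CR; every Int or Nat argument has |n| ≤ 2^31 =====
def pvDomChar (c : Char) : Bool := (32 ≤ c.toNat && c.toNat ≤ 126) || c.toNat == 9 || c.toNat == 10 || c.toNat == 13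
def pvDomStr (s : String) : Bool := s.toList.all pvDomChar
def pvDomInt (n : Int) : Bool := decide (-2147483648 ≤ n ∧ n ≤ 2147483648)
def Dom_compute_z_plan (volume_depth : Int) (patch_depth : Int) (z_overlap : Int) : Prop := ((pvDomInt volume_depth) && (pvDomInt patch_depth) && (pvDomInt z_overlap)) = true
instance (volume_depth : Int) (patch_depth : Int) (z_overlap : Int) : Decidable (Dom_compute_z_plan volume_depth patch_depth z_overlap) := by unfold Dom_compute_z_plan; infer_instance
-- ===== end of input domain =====

-- B replaces A's emit-then-fixup while loop by a starts-first decomposition (a range of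
-- start positions, then overlaps as differences of consecutive starts); objective: simpler.

-- ===== PORT A =====
-- A's while loop; the extra `0 < step ∧ 0 < patch_depth` in the guard only makes the
-- recursion total (under Pre_ it holds whenever `z + patch_depth ≤ volume_depth` does).
def pvLoopA (volume_depth patch_depth z_overlap step z : Int)
    (acc : List (Int × Int)) : List (Int × Int) :=
  if z + patch_depth ≤ volume_depth ∧ 0 < step ∧ 0 < patch_depth then
    pvLoopA volume_depth patch_depth z_overlap step (z + step)
      (acc ++ [if z + patch_depth = volume_depth then (z, -1) else (z, z_overlap)])
  else acc
termination_by (volume_depth - z).toNat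
decreasing_by omega

def pvFixA (volume_depth patch_depth : Int) (patches : List (Int × Int)) : List (Int × Int) :=
  match patches.getLast? with
  | none => [(volume_depth - patch_depth, -1)]
  | some (s, o) =>
    if o ≠ -1 then
      patches.dropLast ++ [(s, s + patch_depth - (volume_depth - patch_depth)), (volume_depth - patch_depth, -1)]
    else patches


def compute_z_plan (volume_depth : Int) (patch_depth : Int) (z_overlap : Int) : List (Int × Int) :=
  let step := patch_depth - z_overlap
  pvFixA volume_depth patch_depth (pvLoopA volume_depth patch_depth z_overlap step 0 [])

-- ===== PORT B =====
def compute_z_plan_alt (volume_depth : Int) (patch_depth : Int) (z_overlap : Int) : List (Int × Int) :=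
  let step := patch_depth - z_overlap
  let last_start := volume_depth - patch_depth
  let starts0 := PySem.List.pyRange 0 (last_start + 1) step
  let starts := if starts0 = [] ∨ starts0.getLast? ≠ some last_start then starts0 ++ [last_start] else starts0
  (starts.zip starts.tail).map (fun p => (p.1, patch_depth - (p.2 - p.1))) ++ [(last_start, -1)]

-- ===== PRECONDITION & SPEC =====
-- Pre_ excludes exactly the inputs on which A's two asserts raise AssertionError
-- (patch_depth ≤ 0, z_overlap < 0, or z_overlap ≥ patch_depth); B has the same asserts there.
def Pre_compute_z_plan (volume_depth : Int) (patch_depth : Int) (z_overlap : Int) : Prop :=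
  0 < patch_depth ∧ 0 ≤ z_overlap ∧ z_overlap < patch_depth
instance (volume_depth : Int) (patch_depth : Int) (z_overlap : Int) : Decidable (Pre_compute_z_plan volume_depth patch_depth z_overlap) := by unfold Pre_compute_z_plan; infer_instance

def pvWitness_compute_z_plan : Int × Int × Int := (10, 4, 1)

def Spec_compute_z_plan (volume_depth : Int) (patch_depth : Int) (z_overlap : Int) (out : List (Int × Int)) : Prop := out = compute_z_plan_alt volume_depth patch_depth z_overlap
instance (volume_depth : Int) (patch_depth : Int) (z_overlap : Int) (out : List (Int × Int)) : Decidable (Spec_compute_z_plan volume_depth patch_depth z_overlap out) := by unfold Spec_compute_z_plan; infer_instance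

-- ===== CLAIM (what is proved, stated in full; the proofs are below) =====
def Claim_equal_compute_z_plan : Prop := ∀ (volume_depth : Int) (patch_depth : Int) (z_overlap : Int), Dom_compute_z_plan volume_depth patch_depth z_overlap → Pre_compute_z_plan volume_depth patch_depth z_overlap → Spec_compute_z_plan volume_depth patch_depth z_overlap (compute_z_plan volume_depth patch_depth z_overlap)

-- ===== LEMMAS AND PROOFS =====
theorem pvLoopA_acc (vd pd zo step : Int) :
    ∀ z acc, pvLoopA vd pd zo step z acc = acc ++ pvLoopA vd pd zo step z [] := by
  intro z acc
  induction hn : (vd - z).toNat using Nat.strong_induction_on generalizing z acc with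
  | _ n ih =>
  rw [pvLoopA]
  conv_rhs => rw [pvLoopA]
  by_cases h : z + pd ≤ vd ∧ 0 < step ∧ 0 < pd
  · rw [if_pos h, if_pos h]
    have e := ih (vd - (z + step)).toNat (by omega) (z + step)
    simp only [List.nil_append]
    rw [e (acc ++ [if z + pd = vd then (z, -1) else (z, zo)]) rfl,
        e ([if z + pd = vd then (z, -1) else (z, zo)]) rfl]
    simp
  · rw [if_neg h, if_neg h]
    simp

theorem pvLoopA_ne_nil (vd pd zo step z : Int)
    (h : z + pd ≤ vd ∧ 0 < step ∧ 0 < pd) : pvLoopA vd pd zo step z [] ≠ [] := by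
  rw [pvLoopA, if_pos h, pvLoopA_acc]
  simp

theorem pvLoopA_nil (vd pd zo step z : Int)
    (h : ¬ (z + pd ≤ vd ∧ 0 < step ∧ 0 < pd)) : pvLoopA vd pd zo step z [] = [] := by
  rw [pvLoopA, if_neg h]

theorem pvFixA_cons (vd pd : Int) (p : Int × Int) (t : List (Int × Int)) (ht : t ≠ []) :
    pvFixA vd pd (p :: t) = p :: pvFixA vd pd t := by
  obtain ⟨x, t', rfl⟩ := List.exists_cons_of_ne_nil ht
  unfold pvFixA
  rw [List.getLast?_cons_cons]
  cases h : (x :: t').getLast? with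
  | none => simp at h
  | some q =>
    obtain ⟨a, b⟩ := q
    dsimp only
    split_ifs with hb
    · simp
    · rfl

theorem pvRange_cons (a b s : Int) (hs : 0 < s) (hab : a < b) :
    PySem.List.pyRange a b s = a :: PySem.List.pyRange (a + s) b s := by
  rw [PySem.List.pyRange_of_pos a b hs, PySem.List.pyRange_of_pos (a+s) b hs]
  rw [if_pos hab]
  by_cases h2 : a + s < b
  · rw [if_pos h2]
    have key : ((b - a + s - 1) / s).toNat = ((b - (a+s) + s - 1) / s).toNat + 1 := by
      have e : b - a + s - 1 = (b - (a+s) + s - 1) + 1 * s := by ring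
      rw [e, Int.add_mul_ediv_right _ _ (by omega : s ≠ 0)]
      have h1 : 0 ≤ (b - (a+s) + s - 1) / s := Int.ediv_nonneg (by omega) (by omega)
      omega
    rw [key, List.range_succ_eq_map, List.map_cons, List.map_map]
    simp only [Int.natCast_zero, mul_zero, add_zero]
    congr 1
    apply List.map_congr_left
    intro k _
    simp only [Function.comp]
    push_cast
    ring
  · rw [if_neg h2]
    have key : ((b - a + s - 1) / s).toNat = 1 := by
      have h1 : (b - a + s - 1) / s = 1 := by
        rw [Int.ediv_eq_iff_of_pos hs]
        constructor <;> omega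
      omega
    rw [key]
    simp

theorem pvRange_nil (a b s : Int) (hs : 0 < s) (hab : b ≤ a) :
    PySem.List.pyRange a b s = [] := by
  rw [PySem.List.pyRange_of_pos a b hs, if_neg (by omega)]
  simp

theorem pvMain (vd pd zo : Int) (hzo : 0 ≤ zo) (hlt : zo < pd) :
    ∀ z,
      pvFixA vd pd (pvLoopA vd pd zo (pd - zo) z []) =
      (let step := pd - zo
       let last_start := vd - pd
       let starts0 := PySem.List.pyRange z (last_start + 1) step
       let starts := if starts0 = [] ∨ starts0.getLast? ≠ some last_start then starts0 ++ [last_start] else starts0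
       (starts.zip starts.tail).map (fun p => (p.1, pd - (p.2 - p.1))) ++ [(last_start, -1)]) := by
  have hs : 0 < pd - zo := by omega
  have hpd : 0 < pd := by omega
  intro z
  induction hn : (vd - pd + 1 - z).toNat using Nat.strong_induction_on generalizing z with
  | _ n ih =>
  simp only []
  by_cases h1 : z + pd ≤ vd
  · by_cases h2 : z + pd = vd
    · -- z = last_start : single exact-fit patch, no fixup
      rw [pvLoopA, if_pos ⟨h1, hs, hpd⟩, if_pos h2, List.nil_append, pvLoopA_acc,
          pvLoopA_nil vd pd zo (pd - zo) (z + (pd - zo)) (by omega), List.append_nil]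
      rw [pvRange_cons _ _ _ hs (by omega), pvRange_nil _ _ _ hs (by omega)]
      have hzL : z = vd - pd := by omega
      simp [pvFixA, hzL]
    · -- z < last_start : loop emits (z, zo) and recurses
      rw [pvLoopA, if_pos ⟨h1, hs, hpd⟩, if_neg h2, List.nil_append,
          pvLoopA_acc, List.singleton_append]
      by_cases h3 : z + (pd - zo) + pd ≤ vd
      · -- next start still fits: peel one element off both sides
        rw [pvFixA_cons _ _ _ _ (pvLoopA_ne_nil _ _ _ _ _ ⟨h3, hs, hpd⟩)]
        rw [ih (vd - pd + 1 - (z + (pd - zo))).toNat (by omega) _ rfl]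
        simp only []
        rw [pvRange_cons z _ _ hs (by omega)]
        rw [pvRange_cons (z + (pd - zo)) _ _ hs (by omega)]
        generalize PySem.List.pyRange (z + (pd - zo) + (pd - zo)) (vd - pd + 1) (pd - zo) = R
        cases R with
        | nil =>
          by_cases hzL : z + (pd - zo) = vd - pd
          · simp [hzL]
            omega
          · simp [hzL]
        | cons y ys =>
          by_cases c : (y :: ys).getLast? = some (vd - pd)
          · simp [List.getLast?_cons_cons, c]
          · simp [List.getLast?_cons_cons, c]
      · -- next start does not fit: loop ends with (z, zo); fixup rewrites it
        rw [pvLoopA_nil vd pd zo (pd - zo) (z + (pd - zo)) (by omega)]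
        rw [pvRange_cons z _ _ hs (by omega), pvRange_nil _ _ _ hs (by omega)]
        have hfix : pvFixA vd pd [(z, zo)] =
            [(z, z + pd - (vd - pd)), (vd - pd, -1)] := by
          unfold pvFixA
          simp only [List.getLast?_singleton]
          rw [if_pos (by omega : zo ≠ -1)]
          simp
        rw [hfix]
        have : ¬ ((z : Int) :: ([] : List Int)).getLast? = some (vd - pd) := by
          simp; omega
        simp only [List.cons_ne_nil, false_or, ne_eq, this, not_false_eq_true, if_true,
          List.cons_append, List.nil_append, List.zip_cons_cons, List.tail_cons, List.map_cons,
          List.zip_nil_right, List.map_nil]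
        congr 2
        omega
  · -- no patch fits: empty loop, single fallback patch
    rw [pvLoopA_nil vd pd zo (pd - zo) z (by omega), pvRange_nil _ _ _ hs (by omega)]
    simp [pvFixA]

-- ===== VERDICT (by name: the statement is the Claim_ definition above) =====
theorem compute_z_plan_spec : Claim_equal_compute_z_plan := by
  intro vd pd zo _hDom hPre
  unfold Spec_compute_z_plan compute_z_plan compute_z_plan_alt
  exact pvMain vd pd zo hPre.2.1 hPre.2.2 0
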